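-- pv_equiv track=rewrite | github.com/brian926/AdventOfCode2023 | Day2/copy.py | possible_games
-- ===== SOURCE A (Python) =====
-- Pull = tuple[int, int, int]
--
-- Games = dict[int, list[Pull]]
--
-- def possible_games(games: Games, cubes: Pull) -> list[int]:
--   return [
--     id
--     for id, pulls in games.items()
--     if all(
--       all(max_cube >= cube for (max_cube, cube) in zip(cubes, pull))
--       for pull in pulls
--     )
--   ]
-- ===== SOURCE B (Python) =====
-- def possible_games(games, cubes):
--     def fits(pulls):
--         # fold pulls into componentwise maxima seeded with the limits themselves:
--         # all pulls fit iff the maxima stay equal to the limits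
--         m = cubes
--         for p in pulls:
--             m = (max(m[0], p[0]), max(m[1], p[1]), max(m[2], p[2]))
--         return m == cubes
--     return [id for id, pulls in games.items() if fits(pulls)]
-- ===== Notes on version B (the rewrite author's own statement) =====
-- stated objective: alternative
-- what changed: Per game, B folds all pulls into one tuple of componentwise maxima seeded with the cube limits and keeps the id iff that tuple is still equal to the limits, replacing A's nested all-over-all per-pull comparisons with a single reduce-then-compare.
import Mathlib
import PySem

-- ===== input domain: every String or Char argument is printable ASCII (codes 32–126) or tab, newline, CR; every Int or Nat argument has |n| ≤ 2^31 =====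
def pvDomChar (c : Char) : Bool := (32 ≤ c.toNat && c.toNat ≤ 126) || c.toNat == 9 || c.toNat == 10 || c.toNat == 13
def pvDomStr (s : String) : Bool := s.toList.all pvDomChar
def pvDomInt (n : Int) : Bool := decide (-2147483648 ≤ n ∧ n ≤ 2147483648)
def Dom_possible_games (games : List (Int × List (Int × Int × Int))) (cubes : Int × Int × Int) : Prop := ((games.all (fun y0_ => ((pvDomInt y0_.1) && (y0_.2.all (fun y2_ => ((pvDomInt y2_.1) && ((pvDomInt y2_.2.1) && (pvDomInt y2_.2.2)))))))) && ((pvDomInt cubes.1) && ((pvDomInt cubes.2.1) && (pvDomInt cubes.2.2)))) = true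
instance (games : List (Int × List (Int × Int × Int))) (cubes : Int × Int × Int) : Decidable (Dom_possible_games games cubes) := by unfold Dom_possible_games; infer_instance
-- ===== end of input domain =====

-- B reduces each game's pulls to one componentwise-maxima tuple (seeded with the
-- cube limits) and compares it to the limits once, instead of A's nested all/all checks.


-- ===== PORT A =====
-- list comprehension over games.items() with an all-over-all filter;
-- zip(cubes, pull) is the three (max_cube, cube) component pairs
def possible_games (games : List (Int × List (Int × Int × Int))) (cubes : Int × Int × Int) : List Int :=
  (games.filter (fun g =>
    g.2.all (fun pull =>
      decide (cubes.1 ≥ pull.1) && decide (cubes.2.1 ≥ pull.2.1) && decide (cubes.2.2 ≥ pull.2.2)))).map (fun g => g.1)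

-- ===== PORT B =====
-- fold the pulls into componentwise maxima seeded with cubes; keep id iff unchanged
def pvMaxStep (m p : Int × Int × Int) : Int × Int × Int :=
  (max m.1 p.1, max m.2.1 p.2.1, max m.2.2 p.2.2)

def possible_games_alt (games : List (Int × List (Int × Int × Int))) (cubes : Int × Int × Int) : List Int :=
  (games.filter (fun g => decide (g.2.foldl pvMaxStep cubes = cubes))).map (fun g => g.1)

-- ===== PRECONDITION & SPEC =====
def Spec_possible_games (games : List (Int × List (Int × Int × Int))) (cubes : Int × Int × Int) (out : List Int) : Prop := out = possible_games_alt games cubes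
instance (games : List (Int × List (Int × Int × Int))) (cubes : Int × Int × Int) (out : List Int) : Decidable (Spec_possible_games games cubes out) := by unfold Spec_possible_games; infer_instance

-- ===== CLAIM (what is proved, stated in full; the proofs are below) =====
def Claim_equal_possible_games : Prop := ∀ (games : List (Int × List (Int × Int × Int))) (cubes : Int × Int × Int), Dom_possible_games games cubes → Spec_possible_games games cubes (possible_games games cubes)

-- ===== LEMMAS AND PROOFS =====

-- the maxima fold only grows, componentwise
theorem pvMaxStep_foldl_ge (l : List (Int × Int × Int)) (a : Int × Int × Int) :
    a.1 ≤ (l.foldl pvMaxStep a).1 ∧ a.2.1 ≤ (l.foldl pvMaxStep a).2.1 ∧ a.2.2 ≤ (l.foldl pvMaxStep a).2.2 := by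
  induction l generalizing a with
  | nil => exact ⟨le_refl _, le_refl _, le_refl _⟩
  | cons p rest ih =>
    obtain ⟨h1, h2, h3⟩ := ih (pvMaxStep a p)
    refine ⟨le_trans ?_ h1, le_trans ?_ h2, le_trans ?_ h3⟩ <;> simp [pvMaxStep]

-- the fold is a fixpoint iff every pull fits within the seed
theorem pvMaxStep_foldl_fix (l : List (Int × Int × Int)) (c : Int × Int × Int) :
    l.foldl pvMaxStep c = c ↔ ∀ p ∈ l, p.1 ≤ c.1 ∧ p.2.1 ≤ c.2.1 ∧ p.2.2 ≤ c.2.2 := by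
  induction l with
  | nil => simp
  | cons p rest ih =>
    simp only [List.foldl_cons, List.mem_cons]
    constructor
    · intro h
      obtain ⟨g1, g2, g3⟩ := pvMaxStep_foldl_ge rest (pvMaxStep c p)
      rw [h] at g1 g2 g3
      simp only [pvMaxStep, max_le_iff] at g1 g2 g3
      have hfix : pvMaxStep c p = c := by
        simp only [pvMaxStep, Prod.ext_iff]
        constructor
        · omega
        constructor <;> simp <;> omega
      rw [hfix] at h
      intro q hq
      rcases hq with hq | hq
      · subst hq; exact ⟨g1.2, g2.2, g3.2⟩
      · exact (ih.mp h) q hq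
    · intro h
      have hfix : pvMaxStep c p = c := by
        obtain ⟨h1, h2, h3⟩ := h p (Or.inl rfl)
        simp only [pvMaxStep, Prod.ext_iff]
        refine ⟨by omega, by simp; omega, by simp; omega⟩
      rw [hfix]
      exact ih.mpr (fun q hq => h q (Or.inr hq))

-- ===== VERDICT (by name: the statement is the Claim_ definition above) =====
theorem possible_games_spec : Claim_equal_possible_games := by
  intro games cubes _
  unfold Spec_possible_games possible_games possible_games_alt
  congr 1
  apply List.filter_congr
  intro g _
  simp only [pvMaxStep_foldl_fix]
  rw [Bool.eq_iff_iff]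
  simp [List.all_eq_true, and_assoc]
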